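-- pv_equiv track=rewrite | github.com/Caruychen/reaktor-humanoid-hunt-2020 | puzzle_2/solver2.py | getSubsequentCharsDict
-- ===== SOURCE A (Python) =====
-- def getSubsequentCharsDict(signal):
--     subCharsLists = {}
--     previousChar = None
--     for currentChar in signal:
--         if currentChar not in subCharsLists:
--             subCharsLists[currentChar] = {}
--         if previousChar != None:
--             if currentChar in subCharsLists[previousChar]:
--                 newValue = subCharsLists[previousChar][currentChar] + 1
--                 subCharsLists[previousChar].update({currentChar: newValue})
--             else:
--                 subCharsLists[previousChar][currentChar] = 1
--         previousChar = currentChar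
--     return subCharsLists
-- ===== SOURCE B (Python) =====
-- def getSubsequentCharsDict(sig):
--     # Group-by re-implementation: one inner counting scan per distinct character.
--     chars = list(sig)
--     pairs = list(zip(chars, chars[1:]))
--     result = {}
--     for prev in dict.fromkeys(chars):
--         inner = {}
--         for p, nxt in pairs:
--             if p == prev:
--                 inner[nxt] = inner.get(nxt, 0) + 1
--         result[prev] = inner
--     return result
-- ===== Notes on version B (the rewrite author's own statement) =====
-- stated objective: alternative
-- what changed: Replaced A's single stateful pass (previousChar variable, register-and-bump per step) by a group-by algorithm: build the adjacent-pair list once, then for each distinct character (dict.fromkeys order) run a separate counting scan over the pairs whose first component is that character.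
import Mathlib
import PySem

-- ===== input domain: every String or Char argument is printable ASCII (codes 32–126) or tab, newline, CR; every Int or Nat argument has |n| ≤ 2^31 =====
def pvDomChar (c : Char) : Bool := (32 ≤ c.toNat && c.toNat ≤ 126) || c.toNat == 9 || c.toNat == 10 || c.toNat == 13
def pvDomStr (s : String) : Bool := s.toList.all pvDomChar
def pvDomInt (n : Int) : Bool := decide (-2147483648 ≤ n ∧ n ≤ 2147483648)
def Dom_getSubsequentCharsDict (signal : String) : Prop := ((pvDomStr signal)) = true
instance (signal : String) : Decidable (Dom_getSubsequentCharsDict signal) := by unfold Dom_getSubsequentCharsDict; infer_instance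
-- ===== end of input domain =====

-- B replaces A's single stateful pass (previousChar state) by a group-by algorithm: one
-- inner counting scan over the adjacent pairs per distinct character (alternative, not faster).

-- ===== PORT A =====
-- iterating a Python string yields one-character strings
def pvChar (c : Char) : String := String.ofList [c]

-- 'if currentChar not in subCharsLists: subCharsLists[currentChar] = {}'
def pvRegA (d : PySem.Dict String (PySem.Dict String Int)) (c : String) :
    PySem.Dict String (PySem.Dict String Int) :=
  if d.contains c then d else d.insert c PySem.Dict.empty

-- the 'if previousChar != None' body (inner-dict mutation = insert at a present key)
def pvBumpA (d : PySem.Dict String (PySem.Dict String Int)) (p c : String) :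
    PySem.Dict String (PySem.Dict String Int) :=
  match (d.getD p PySem.Dict.empty).get? c with
  | some v => d.insert p ((d.getD p PySem.Dict.empty).insert c (v + 1))
  | none   => d.insert p ((d.getD p PySem.Dict.empty).insert c 1)

def pvStepA (st : PySem.Dict String (PySem.Dict String Int) × Option String) (c : String) :
    PySem.Dict String (PySem.Dict String Int) × Option String :=
  let d := pvRegA st.1 c
  let d := match st.2 with
    | none => d
    | some p => pvBumpA d p c
  (d, some c)

def getSubsequentCharsDict (signal : String) : List (String × List (String × Int)) :=
  (((signal.toList.map pvChar).foldl pvStepA (PySem.Dict.empty, none)).1).items.map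
    (fun p => (p.1, p.2.items))

-- ===== PORT B =====
-- 'inner[nxt] = inner.get(nxt, 0) + 1'
def pvInnerBump (m : PySem.Dict String Int) (c : String) : PySem.Dict String Int :=
  m.insert c (m.getD c 0 + 1)

def getSubsequentCharsDict_alt (signal : String) : List (String × List (String × Int)) :=
  let cs := signal.toList.map pvChar          -- chars = list(signal)
  let pairs := cs.zip cs.tail                 -- pairs = list(zip(chars, chars[1:]))
  -- 'for prev in dict.fromkeys(chars): … result[prev] = inner'
  let result := (PySem.Set.ofList cs).foldl
    (fun r prev => r.insert prev
      -- 'for p, nxt in pairs: if p == prev: inner[nxt] = inner.get(nxt, 0) + 1'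
      (pairs.foldl (fun inner pc => if pc.1 == prev then pvInnerBump inner pc.2 else inner)
        PySem.Dict.empty))
    PySem.Dict.empty
  result.items.map (fun p => (p.1, p.2.items))

-- ===== PRECONDITION & SPEC =====
def Spec_getSubsequentCharsDict (signal : String) (out : List (String × List (String × Int))) : Prop := out = getSubsequentCharsDict_alt signal
instance (signal : String) (out : List (String × List (String × Int))) : Decidable (Spec_getSubsequentCharsDict signal out) := by unfold Spec_getSubsequentCharsDict; infer_instance

-- ===== CLAIM (what is proved, stated in full; the proofs are below) =====
def Claim_equal_getSubsequentCharsDict : Prop := ∀ (signal : String), Dom_getSubsequentCharsDict signal → Spec_getSubsequentCharsDict signal (getSubsequentCharsDict signal)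

-- ===== LEMMAS AND PROOFS =====

-- proof-only helper: the transition bump of A's fused pass, written with pvInnerBump
def pvBumpB (d : PySem.Dict String (PySem.Dict String Int)) (p c : String) :
    PySem.Dict String (PySem.Dict String Int) :=
  d.insert p (pvInnerBump (d.getD p PySem.Dict.empty) c)

theorem bumpA_eq_bumpB (d : PySem.Dict String (PySem.Dict String Int)) (p c : String) :
    pvBumpA d p c = pvBumpB d p c := by
  cases h : (d.getD p PySem.Dict.empty).get? c with
  | some v =>
      simp only [pvBumpA, pvBumpB, pvInnerBump, h,
        PySem.Dict.getD_of_get?_eq_some (d.getD p PySem.Dict.empty) 0 h]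
  | none =>
      simp only [pvBumpA, pvBumpB, pvInnerBump, h,
        PySem.Dict.getD_of_get?_eq_none (d.getD p PySem.Dict.empty) 0 h]
      norm_num

theorem mem_keys_regA (d : PySem.Dict String (PySem.Dict String Int)) (c x : String)
    (h : x ∈ d.keys) : x ∈ (pvRegA d c).keys := by
  unfold pvRegA
  split
  · exact h
  · exact (PySem.Dict.mem_keys_insert _ _ _ _).2 (Or.inr h)

theorem self_mem_keys_regA (d : PySem.Dict String (PySem.Dict String Int)) (c : String) :
    c ∈ (pvRegA d c).keys := by
  unfold pvRegA
  split
  · exact (PySem.Dict.contains_iff_mem_keys _ _).1 (by assumption)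
  · exact (PySem.Dict.mem_keys_insert _ _ _ _).2 (Or.inl rfl)

theorem mem_keys_bumpB (d : PySem.Dict String (PySem.Dict String Int)) (p c x : String)
    (h : x ∈ d.keys) : x ∈ (pvBumpB d p c).keys := by
  exact (PySem.Dict.mem_keys_insert _ _ _ _).2 (Or.inr h)

-- single-step commutation: registering a fresh/old key commutes with a bump at an existing key
theorem regA_bumpB_comm (d : PySem.Dict String (PySem.Dict String Int)) (p c c' : String)
    (hp : p ∈ d.keys) :
    pvRegA (pvBumpB d p c) c' = pvBumpB (pvRegA d c') p c := by
  have hpc : d.contains p = true := (PySem.Dict.contains_iff_mem_keys _ _).2 hp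
  by_cases hc' : c' ∈ d.keys
  · have h1 : (pvBumpB d p c).contains c' = true :=
      (PySem.Dict.contains_iff_mem_keys _ _).2 (mem_keys_bumpB d p c c' hc')
    have h2 : d.contains c' = true := (PySem.Dict.contains_iff_mem_keys _ _).2 hc'
    simp [pvRegA, h1, h2]
  · have hne : c' ≠ p := fun h => hc' (h ▸ hp)
    have h2 : d.contains c' = false := by
      cases hcc : d.contains c' with
      | false => rfl
      | true => exact absurd ((PySem.Dict.contains_iff_mem_keys _ _).1 hcc) hc'
    have h1 : (pvBumpB d p c).contains c' = false := by
      unfold pvBumpB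
      rw [PySem.Dict.contains_insert]
      simp [h2, hne]
    have hgd : (d.insert c' PySem.Dict.empty).getD p PySem.Dict.empty
        = d.getD p PySem.Dict.empty := PySem.Dict.getD_insert_of_ne d _ _ (Ne.symm hne)
    unfold pvBumpB at h1
    simp only [pvRegA, pvBumpB, h1, h2, hgd, Bool.false_eq_true, if_false]
    apply PySem.Dict.ext
    have hc'ins : (d.insert p (pvInnerBump (d.getD p PySem.Dict.empty) c)).contains c' = false := by
      rw [PySem.Dict.contains_insert]; simp [h2, hne]
    have hpins : (d.insert c' PySem.Dict.empty).contains p = true := by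
      rw [PySem.Dict.contains_insert]; simp [hpc]
    rw [PySem.Dict.items_insert_of_not_contains _ _ hc'ins,
        PySem.Dict.items_insert_of_contains _ _ hpc,
        PySem.Dict.items_insert_of_contains _ _ hpins,
        PySem.Dict.items_insert_of_not_contains _ _ h2]
    rw [List.map_append]
    simp [hne]

-- the bump commutes past the whole registration pass
theorem foldReg_bumpB_comm (cs : List String) :
    ∀ (d : PySem.Dict String (PySem.Dict String Int)) (p c : String), p ∈ d.keys →
    cs.foldl pvRegA (pvBumpB d p c) = pvBumpB (cs.foldl pvRegA d) p c := by
  induction cs with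
  | nil => intro d p c _; rfl
  | cons c' rest ih =>
      intro d p c hp
      simp only [List.foldl_cons]
      rw [regA_bumpB_comm d p c c' hp]
      exact ih (pvRegA d c') p c (mem_keys_regA d c' p hp)

-- main fused-loop invariant: A's stateful pass from (d, some p) = register-then-count
theorem loopA_eq (l : List String) :
    ∀ (d : PySem.Dict String (PySem.Dict String Int)) (p : String), p ∈ d.keys →
    (l.foldl pvStepA (d, some p)).1
      = (((p :: l).zip l).foldl (fun d pc => pvBumpB d pc.1 pc.2) (l.foldl pvRegA d)) := by
  induction l with
  | nil => intro d p _; rfl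
  | cons c rest ih =>
      intro d p hp
      have hstep : pvStepA (d, some p) c = (pvBumpA (pvRegA d c) p c, some c) := rfl
      have hc : c ∈ (pvBumpB (pvRegA d c) p c).keys :=
        mem_keys_bumpB _ p c c (self_mem_keys_regA d c)
      have hp' : p ∈ (pvRegA d c).keys := mem_keys_regA d c p hp
      calc ((c :: rest).foldl pvStepA (d, some p)).1
          = (rest.foldl pvStepA (pvBumpB (pvRegA d c) p c, some c)).1 := by
            rw [List.foldl_cons, hstep, bumpA_eq_bumpB]
        _ = ((c :: rest).zip rest).foldl (fun d pc => pvBumpB d pc.1 pc.2)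
              (rest.foldl pvRegA (pvBumpB (pvRegA d c) p c)) := ih _ c hc
        _ = ((c :: rest).zip rest).foldl (fun d pc => pvBumpB d pc.1 pc.2)
              (pvBumpB (rest.foldl pvRegA (pvRegA d c)) p c) := by
            rw [foldReg_bumpB_comm rest _ p c hp']
        _ = ((p :: c :: rest).zip (c :: rest)).foldl (fun d pc => pvBumpB d pc.1 pc.2)
              ((c :: rest).foldl pvRegA d) := rfl

-- insert-always (all values {}) equals A's insert-if-absent
theorem foldInit_eq_foldReg (cs : List String) :
    ∀ (d : PySem.Dict String (PySem.Dict String Int)),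
    (∀ v ∈ d.values, v = PySem.Dict.empty) →
    cs.foldl (fun d c => d.insert c PySem.Dict.empty) d = cs.foldl pvRegA d := by
  induction cs with
  | nil => intro d _; rfl
  | cons c rest ih =>
      intro d hv
      have hstep : d.insert c PySem.Dict.empty = pvRegA d c := by
        unfold pvRegA
        split
        · next hc =>
            apply PySem.Dict.ext
            rw [PySem.Dict.items_insert_of_contains _ _ hc]
            conv_rhs => rw [← List.map_id d.items]
            apply List.map_congr_left
            intro q hq
            by_cases h : q.1 == c
            · have h1 : q.1 = c := by exact eq_of_beq h
              have h2 : q.2 = PySem.Dict.empty := by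
                apply hv
                simp only [PySem.Dict.values]
                exact List.mem_map_of_mem hq
              simp [← h1, ← h2]
            · simp [h]
        · rfl
      have hv' : ∀ v ∈ (d.insert c PySem.Dict.empty).values, v = PySem.Dict.empty := by
        intro v hvv
        rcases PySem.Dict.mem_values_insert _ _ _ _ hvv with h | h
        · exact h
        · exact hv v h
      simp only [List.foldl_cons]
      rw [← hstep]
      exact ih _ hv'

-- every value stored by the init pass is {}
theorem getD_foldInit (cs : List String) :
    ∀ (d : PySem.Dict String (PySem.Dict String Int)) (k : String),
    (∀ x, d.getD x PySem.Dict.empty = PySem.Dict.empty) →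
    (cs.foldl (fun d c => d.insert c PySem.Dict.empty) d).getD k PySem.Dict.empty
      = PySem.Dict.empty := by
  induction cs with
  | nil => intro d k h; exact h k
  | cons c rest ih =>
      intro d k h
      refine ih _ k (fun x => ?_)
      rw [PySem.Dict.getD_insert]
      split <;> simp [h]

-- the init pass produces exactly the distinct characters, each mapped to {}
theorem items_foldInit (cs : List String) :
    (cs.foldl (fun d c => d.insert c PySem.Dict.empty) PySem.Dict.empty).items
      = (PySem.Set.ofList cs).map (fun k => (k, (PySem.Dict.empty : PySem.Dict String Int))) := by
  set D := cs.foldl (fun d c => d.insert c PySem.Dict.empty) PySem.Dict.empty with hD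
  have hkeys : D.keys = PySem.Set.ofList cs := by
    rw [hD, PySem.Dict.keys_foldl_insert, PySem.Dict.keys_empty, PySem.Set.update_nil_left]
  have hnd : D.keys.Nodup := hkeys ▸ PySem.Set.nodup_ofList cs
  rw [PySem.Dict.items_eq_map_keys D hnd PySem.Dict.empty, hkeys]
  apply List.map_congr_left
  intro k _
  rw [hD, getD_foldInit cs PySem.Dict.empty k (fun x => PySem.Dict.getD_empty x _)]

-- a guarded fold is a fold over the filtered list
theorem foldl_guard_eq_filter {α β : Type} (l : List α) (p : α → Bool) (f : β → α → β) :
    ∀ (init : β),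
    l.foldl (fun acc x => if p x then f acc x else acc) init = (l.filter p).foldl f init := by
  induction l with
  | nil => intro init; rfl
  | cons x rest ih =>
      intro init
      by_cases h : p x <;> simp [h, ih]

-- the counting pass rewrites each stored value by the inner fold over its own pairs
theorem items_foldBumpB (ps : List (String × String)) :
    ∀ (d : PySem.Dict String (PySem.Dict String Int)),
    d.keys.Nodup → (∀ q ∈ ps, d.contains q.1 = true) →
    (ps.foldl (fun d pc => pvBumpB d pc.1 pc.2) d).items
      = d.items.map (fun kv => (kv.1,
          (ps.filter (fun q => q.1 == kv.1)).foldl (fun m q => pvInnerBump m q.2) kv.2)) := by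
  induction ps with
  | nil =>
      intro d _ _
      simp
  | cons q rest ih =>
      intro d hnd hmem
      have hcp : d.contains q.1 = true := hmem q (List.mem_cons_self)
      have hitems1 : (pvBumpB d q.1 q.2).items
          = d.items.map (fun kv => if kv.1 == q.1
              then (q.1, pvInnerBump (d.getD q.1 PySem.Dict.empty) q.2) else kv) := by
        unfold pvBumpB
        exact PySem.Dict.items_insert_of_contains _ _ hcp
      have hkeys1 : (pvBumpB d q.1 q.2).keys = d.keys := by
        unfold pvBumpB
        exact PySem.Dict.keys_insert_of_contains _ _ hcp
      have hnd1 : (pvBumpB d q.1 q.2).keys.Nodup := hkeys1 ▸ hnd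
      have hmem1 : ∀ q' ∈ rest, (pvBumpB d q.1 q.2).contains q'.1 = true := by
        intro q' hq'
        unfold pvBumpB
        rw [PySem.Dict.contains_insert, hmem q' (List.mem_cons_of_mem _ hq')]
        simp
      simp only [List.foldl_cons]
      rw [ih _ hnd1 hmem1, hitems1, List.map_map]
      apply List.map_congr_left
      rintro ⟨a, b⟩ hkv
      simp only [Function.comp]
      by_cases h : a = q.1
      · have h2 : d.getD q.1 PySem.Dict.empty = b :=
          PySem.Dict.getD_of_mem_items _ (h ▸ hkv) hnd _
        rw [List.filter_cons]
        simp [h, h2]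
      · rw [List.filter_cons]
        have hq : (q.1 == a) = false := beq_eq_false_iff_ne.2 (fun hh => h hh.symm)
        simp [h, hq]

theorem mem_keys_init_of_pair (cs : List String) (q : String × String)
    (hq : q ∈ cs.zip cs.tail) :
    (cs.foldl (fun (d : PySem.Dict String (PySem.Dict String Int)) c =>
        d.insert c PySem.Dict.empty) PySem.Dict.empty).contains q.1 = true := by
  have h1 : q.1 ∈ cs := (List.of_mem_zip hq).1
  apply (PySem.Dict.contains_iff_mem_keys _ _).2
  have hkeys : (cs.foldl (fun (d : PySem.Dict String (PySem.Dict String Int)) c =>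
      d.insert c PySem.Dict.empty) PySem.Dict.empty).keys
      = PySem.Set.ofList cs := by
    rw [PySem.Dict.keys_foldl_insert, PySem.Dict.keys_empty, PySem.Set.update_nil_left]
  rw [hkeys]
  exact (PySem.Set.mem_ofList _ _).2 h1

-- ===== VERDICT (by name: the statement is the Claim_ definition above) =====
theorem getSubsequentCharsDict_spec : Claim_equal_getSubsequentCharsDict := by
  intro signal _
  unfold Spec_getSubsequentCharsDict getSubsequentCharsDict getSubsequentCharsDict_alt
  dsimp only
  set cs := signal.toList.map pvChar with hcs
  -- A's fused pass equals the counting pass over the registered dict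
  have hA : ((cs.foldl pvStepA (PySem.Dict.empty, none)).1)
      = ((cs.zip cs.tail).foldl (fun d pc => pvBumpB d pc.1 pc.2)
          (cs.foldl (fun d c => d.insert c PySem.Dict.empty) PySem.Dict.empty)) := by
    cases hc : cs with
    | nil => rfl
    | cons c rest =>
        have hstep : pvStepA (PySem.Dict.empty, none) c
            = (pvRegA PySem.Dict.empty c, some c) := rfl
        have hcm : c ∈ (pvRegA PySem.Dict.empty c).keys := self_mem_keys_regA _ c
        rw [List.foldl_cons, hstep, loopA_eq rest _ c hcm,
            ← foldInit_eq_foldReg rest (pvRegA PySem.Dict.empty c)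
              (by intro v hv
                  unfold pvRegA at hv
                  rw [PySem.Dict.contains_empty] at hv
                  simp only [Bool.false_eq_true, if_false] at hv
                  rcases PySem.Dict.mem_values_insert _ _ _ _ hv with h | h
                  · exact h
                  · simp [PySem.Dict.values, PySem.Dict.empty] at h)]
        have hreg : pvRegA PySem.Dict.empty c = PySem.Dict.empty.insert c PySem.Dict.empty := by
          unfold pvRegA; simp [PySem.Dict.contains_empty]
        rw [hreg]
        rfl
  rw [hA]
  set init := cs.foldl (fun d c => d.insert c PySem.Dict.empty) PySem.Dict.empty with hinit
  have hndinit : init.keys.Nodup := by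
    rw [hinit]
    exact PySem.Dict.nodup_keys_foldl_insert _ _ _ (by simp [PySem.Dict.keys_empty])
  have hAitems := items_foldBumpB (cs.zip cs.tail) init hndinit
    (fun q hq => mem_keys_init_of_pair cs q hq)
  rw [hAitems, hinit, items_foldInit cs, List.map_map]
  -- B's side: the outer loop over fresh distinct keys appends
  have hBitems : ((PySem.Set.ofList cs).foldl
      (fun r prev => r.insert prev
        ((cs.zip cs.tail).foldl
          (fun inner pc => if pc.1 == prev then pvInnerBump inner pc.2 else inner)
          PySem.Dict.empty))
      PySem.Dict.empty).items
      = (PySem.Set.ofList cs).map (fun prev => (prev,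
          (cs.zip cs.tail).foldl
            (fun inner pc => if pc.1 == prev then pvInnerBump inner pc.2 else inner)
            PySem.Dict.empty)) := by
    have := PySem.Dict.items_foldl_insert_fresh (l := PySem.Set.ofList cs)
      (d := (PySem.Dict.empty : PySem.Dict String (PySem.Dict String Int)))
      (k := fun a => a)
      (v := fun prev => (cs.zip cs.tail).foldl
          (fun inner pc => if pc.1 == prev then pvInnerBump inner pc.2 else inner)
          PySem.Dict.empty)
      (by intro a _; simp)
      (by simp)
    simpa using this
  rw [hBitems]
  simp only [List.map_map]
  apply List.map_congr_left
  intro k _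
  simp only [Function.comp]
  rw [foldl_guard_eq_filter]
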